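-- pv_equiv track=rewrite | github.com/caseybarajas/Melodia | melodia/utils/music.py | avoid_parallel_fifths
-- ===== SOURCE A (Python) =====
-- from typing import List, Dict, Optional, Union, Tuple, Set
--
-- def avoid_parallel_fifths(
--     chord1: List[int],
--     chord2: List[int]
-- ) -> List[int]:
--     """Adjust voice leading to avoid parallel fifths"""
--     if len(chord1) < 2 or len(chord2) < 2:
--         return chord2
--
--     # Find fifths in first chord
--     fifths1 = []
--     for i in range(len(chord1)):
--         for j in range(i + 1, len(chord1)):
--             if (chord1[j] - chord1[i]) % 12 == 7:
--                 fifths1.append((i, j))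
--
--     # Check and adjust parallel fifths
--     result = list(chord2)
--     for i, j in fifths1:
--         if i < len(chord2) and j < len(chord2):
--             if (chord2[j] - chord2[i]) % 12 == 7:
--                 # Adjust second chord to avoid parallel fifth
--                 result[j] = (result[j] + 1) % 12
--
--     return result
-- ===== SOURCE B (Python) =====
-- def avoid_parallel_fifths(chord1, chord2):
--     """Adjust voice leading to avoid parallel fifths (single pass, hashed counts)."""
--     if len(chord1) < 2 or len(chord2) < 2:
--         return chord2
--     result = list(chord2)
--     counts = {}
--     for j in range(min(len(chord1), len(chord2))):
--         k = counts.get(((chord1[j] - 7) % 12, (chord2[j] - 7) % 12), 0)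
--         if k:
--             result[j] = (chord2[j] + k) % 12
--         key = (chord1[j] % 12, chord2[j] % 12)
--         counts[key] = counts.get(key, 0) + 1
--     return result
-- ===== Notes on version B (the rewrite author's own statement) =====
-- stated objective: faster
-- what changed: A enumerates all index pairs of chord1 (quadratic) and then replays the matching pairs onto result; B makes a single pass over the indices, keeping a hash map that counts earlier indices by their (chord1[i] % 12, chord2[i] % 12) key, so each result[j] is computed directly from one lookup of how many earlier i form a fifth with j in both chords.
import Mathlib
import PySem

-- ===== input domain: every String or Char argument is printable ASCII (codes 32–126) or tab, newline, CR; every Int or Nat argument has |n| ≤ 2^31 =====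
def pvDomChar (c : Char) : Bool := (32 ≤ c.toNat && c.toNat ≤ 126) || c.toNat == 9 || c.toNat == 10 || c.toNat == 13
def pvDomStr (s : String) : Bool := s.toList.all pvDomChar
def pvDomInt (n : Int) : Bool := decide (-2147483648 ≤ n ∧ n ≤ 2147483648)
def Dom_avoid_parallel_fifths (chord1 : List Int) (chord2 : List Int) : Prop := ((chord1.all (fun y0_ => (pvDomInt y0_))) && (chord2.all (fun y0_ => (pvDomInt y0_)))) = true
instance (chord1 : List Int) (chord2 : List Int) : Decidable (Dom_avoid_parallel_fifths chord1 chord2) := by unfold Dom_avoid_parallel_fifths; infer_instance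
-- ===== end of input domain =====

-- B replaces A's quadratic pair-enumeration by one pass with a hash map counting
-- earlier matching mod-12 offset pairs (objective: faster, O(n) vs O(n^2)).

-- ===== PORT A =====
-- step of A's second loop: 'for i, j in fifths1: if i < len(chord2) and j < len(chord2): if (chord2[j]-chord2[i]) % 12 == 7: result[j] = (result[j]+1) % 12'
def pvStepA (chord2 : List Int) (res : List Int) (p : Int × Int) : List Int :=
  if p.1 < (chord2.length : Int) ∧ p.2 < (chord2.length : Int) then
    if PySem.Int.mod (PySem.List.pyGetD chord2 p.2 0 - PySem.List.pyGetD chord2 p.1 0) 12 = 7 then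
      PySem.List.pySetD res p.2 (PySem.Int.mod (PySem.List.pyGetD res p.2 0 + 1) 12)
    else res
  else res

def avoid_parallel_fifths (chord1 : List Int) (chord2 : List Int) : List Int :=
  if chord1.length < 2 ∨ chord2.length < 2 then chord2
  else
    -- fifths1: nested index loops appending (i, j) when (chord1[j]-chord1[i]) % 12 == 7;
    -- then result = list(chord2) and the adjustment loop over fifths1
    ((PySem.List.pyRange 0 (chord1.length : Int)).foldl (fun acc i =>
        (PySem.List.pyRange (i + 1) (chord1.length : Int)).foldl (fun acc2 j =>
          if PySem.Int.mod (PySem.List.pyGetD chord1 j 0 - PySem.List.pyGetD chord1 i 0) 12 = 7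
          then acc2 ++ [(i, j)] else acc2) acc) []).foldl (pvStepA chord2) chord2

-- ===== PORT B =====
-- one step of B's single loop: look up the count of earlier matching offset pairs, adjust, then count this index's key
def pvStepB (chord1 : List Int) (chord2 : List Int)
    (st : List Int × PySem.Dict (Int × Int) Int) (j : Int) : List Int × PySem.Dict (Int × Int) Int :=
  let k := st.2.getD (PySem.Int.mod (PySem.List.pyGetD chord1 j 0 - 7) 12,
                      PySem.Int.mod (PySem.List.pyGetD chord2 j 0 - 7) 12) 0
  let res' := if k ≠ 0 then PySem.List.pySetD st.1 j (PySem.Int.mod (PySem.List.pyGetD chord2 j 0 + k) 12)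
              else st.1
  let key := (PySem.Int.mod (PySem.List.pyGetD chord1 j 0) 12, PySem.Int.mod (PySem.List.pyGetD chord2 j 0) 12)
  (res', st.2.insert key (st.2.getD key 0 + 1))

def avoid_parallel_fifths_alt (chord1 : List Int) (chord2 : List Int) : List Int :=
  if chord1.length < 2 ∨ chord2.length < 2 then chord2
  else
    ((PySem.List.pyRange 0 (min (chord1.length : Int) (chord2.length : Int))).foldl
      (pvStepB chord1 chord2) (chord2, PySem.Dict.empty)).1

-- ===== PRECONDITION & SPEC =====
def Spec_avoid_parallel_fifths (chord1 : List Int) (chord2 : List Int) (out : List Int) : Prop := out = avoid_parallel_fifths_alt chord1 chord2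
instance (chord1 : List Int) (chord2 : List Int) (out : List Int) : Decidable (Spec_avoid_parallel_fifths chord1 chord2 out) := by unfold Spec_avoid_parallel_fifths; infer_instance

-- ===== CLAIM (what is proved, stated in full; the proofs are below) =====
def Claim_equal_avoid_parallel_fifths : Prop := ∀ (chord1 : List Int) (chord2 : List Int), Dom_avoid_parallel_fifths chord1 chord2 → Spec_avoid_parallel_fifths chord1 chord2 (avoid_parallel_fifths chord1 chord2)

-- ===== LEMMAS AND PROOFS =====

-- the bump A applies each time an index is adjusted
def pvBump (x : Int) : Int := PySem.Int.mod (x + 1) 12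

-- the pair condition at target index t and earlier index i
def pvCond (chord1 chord2 : List Int) (t i : Int) : Bool :=
  decide (PySem.Int.mod (PySem.List.pyGetD chord1 t 0 - PySem.List.pyGetD chord1 i 0) 12 = 7 ∧
          PySem.Int.mod (PySem.List.pyGetD chord2 t 0 - PySem.List.pyGetD chord2 i 0) 12 = 7)

-- number of earlier indices i < t forming a parallel fifth with t in both chords
def pvK (chord1 chord2 : List Int) (t : Int) : Nat :=
  (PySem.List.pyRange 0 t).countP (pvCond chord1 chord2 t)

-- whether A's adjustment loop fires at pair p for target index t
def pvQ (chord2 : List Int) (t : Nat) (p : Int × Int) : Bool :=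
  decide (p.2 = (t : Int) ∧ p.1 < (chord2.length : Int) ∧ p.2 < (chord2.length : Int) ∧
          PySem.Int.mod (PySem.List.pyGetD chord2 p.2 0 - PySem.List.pyGetD chord2 p.1 0) 12 = 7)

lemma pvBump_iter (k : Nat) (x : Int) : pvBump^[k + 1] x = PySem.Int.mod (x + (k + 1)) 12 := by
  induction k with
  | zero => simp [pvBump]
  | succ k ih =>
    rw [Function.iterate_succ_apply', ih, pvBump,
        PySem.Int.mod_eq_emod_of_pos (by norm_num : (0:Int) < 12),
        PySem.Int.mod_eq_emod_of_pos (by norm_num : (0:Int) < 12),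
        PySem.Int.mod_eq_emod_of_pos (by norm_num : (0:Int) < 12)]
    push_cast
    omega

lemma pvFoldA_length (chord2 : List Int) (l : List (Int × Int)) (res : List Int) :
    (l.foldl (pvStepA chord2) res).length = res.length := by
  induction l generalizing res with
  | nil => rfl
  | cons p l ih =>
    rw [List.foldl_cons, ih]
    unfold pvStepA
    split_ifs <;> simp [PySem.List.length_pySetD]

lemma pvStepA_getD (chord2 res : List Int) (p : Int × Int) (hlen : res.length = chord2.length)
    (hp : 0 ≤ p.2) (t : Nat) (ht : t < chord2.length) :
    (pvStepA chord2 res p).getD t 0 = if pvQ chord2 t p then pvBump (res.getD t 0) else res.getD t 0 := by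
  unfold pvStepA pvQ
  by_cases hb : p.1 < (chord2.length : Int) ∧ p.2 < (chord2.length : Int)
  · rw [if_pos hb]
    by_cases hm : PySem.Int.mod (PySem.List.pyGetD chord2 p.2 0 - PySem.List.pyGetD chord2 p.1 0) 12 = 7
    · rw [if_pos hm, PySem.List.pySetD_of_nonneg _ _ hp]
      by_cases hpt : p.2 = (t : Int)
      · rw [hpt]
        have htn : ((t : Int)).toNat = t := Int.toNat_natCast t
        rw [htn]
        have htl : t < res.length := hlen ▸ ht
        rw [if_pos (by exact decide_eq_true (by exact ⟨rfl, hb.1, hpt ▸ hb.2, hpt ▸ hm⟩))]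
        simp [List.getD, htl, pvBump, PySem.List.pyGetD_natCast]
      · have hne : p.2.toNat ≠ t := by omega
        rw [if_neg (by simp only [decide_eq_true_eq]; exact fun hq => hpt hq.1)]
        simp [List.getD, List.getElem?_set_ne hne]
    · rw [if_neg hm, if_neg (by simp only [decide_eq_true_eq]; exact fun hq => hm hq.2.2.2)]
  · rw [if_neg hb, if_neg (by simp only [decide_eq_true_eq]; exact fun hq => hb ⟨hq.2.1, hq.2.2.1⟩)]

lemma pvFoldA_getD (chord2 : List Int) (l : List (Int × Int)) (res : List Int)
    (hlen : res.length = chord2.length) (hl : ∀ p ∈ l, 0 ≤ p.2) (t : Nat) (ht : t < chord2.length) :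
    (l.foldl (pvStepA chord2) res).getD t 0 = pvBump^[l.countP (pvQ chord2 t)] (res.getD t 0) := by
  induction l generalizing res with
  | nil => simp
  | cons p l ih =>
    have hlen' : (pvStepA chord2 res p).length = res.length := pvFoldA_length chord2 [p] res
    rw [List.foldl_cons, ih (pvStepA chord2 res p) (hlen' ▸ hlen) (fun q hq => hl q (List.mem_cons_of_mem _ hq)),
        pvStepA_getD chord2 res p hlen (hl p List.mem_cons_self) t ht, List.countP_cons]
    by_cases hq : pvQ chord2 t p = true
    · rw [if_pos hq, if_pos hq, ← Function.iterate_succ_apply]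
    · rw [if_neg hq, if_neg hq, Nat.add_zero]

-- countP of a flatMap is the sum of the per-block counts
lemma pvCountP_flatMap {α β : Type} (l : List α) (g : α → List β) (p : β → Bool) :
    (l.flatMap g).countP p = (l.map (fun i => (g i).countP p)).sum := by
  induction l with
  | nil => simp
  | cons x l ih => simp [List.countP_append, ih]

-- countP of a predicate that forces a single value, on a Nodup list
lemma pvCountP_forces {α : Type} [DecidableEq α] (l : List α) (p : α → Bool) (a : α)
    (hnd : l.Nodup) (hf : ∀ x, p x = true → x = a) :
    l.countP p = if a ∈ l ∧ p a then 1 else 0 := by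
  induction l with
  | nil => simp
  | cons x l ih =>
    rw [List.countP_cons]
    rcases List.nodup_cons.mp hnd with ⟨hx, hnd'⟩
    by_cases hpx : p x = true
    · have hxa : x = a := hf x hpx
      subst hxa
      have h0 : l.countP p = 0 := List.countP_eq_zero.mpr (fun y hy hpy => hx ((hf y hpy) ▸ hy))
      simp [h0, hpx]
    · rw [ih hnd', if_neg hpx]
      by_cases hpa : p a = true
      · have hax : a ≠ x := fun hax => hpx (hax ▸ hpa)
        simp [List.mem_cons, hpa, hax]
      · simp [hpa]

-- a 0/1 indicator sum is a countP
lemma pvSum_ite_countP {α : Type} (l : List α) (P : α → Prop) [DecidablePred P] :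
    (l.map (fun i => if P i then 1 else 0)).sum = l.countP (fun i => decide (P i)) := by
  induction l with
  | nil => simp
  | cons x l ih =>
    rw [List.map_cons, List.sum_cons, List.countP_cons, ih]
    by_cases hx : P x <;> simp [hx, Nat.add_comm]

-- A's fifths1 list in closed form
lemma pvFifths_eq (chord1 : List Int) :
    ((PySem.List.pyRange 0 (chord1.length : Int)).foldl (fun acc i =>
        (PySem.List.pyRange (i + 1) (chord1.length : Int)).foldl (fun acc2 j =>
          if PySem.Int.mod (PySem.List.pyGetD chord1 j 0 - PySem.List.pyGetD chord1 i 0) 12 = 7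
          then acc2 ++ [(i, j)] else acc2) acc) []) =
    (PySem.List.pyRange 0 (chord1.length : Int)).flatMap (fun i =>
      ((PySem.List.pyRange (i + 1) (chord1.length : Int)).filter (fun j =>
        decide (PySem.Int.mod (PySem.List.pyGetD chord1 j 0 - PySem.List.pyGetD chord1 i 0) 12 = 7))).map
        (fun j => (i, j))) := by
  have h1 : ∀ (i : Int) (acc : List (Int × Int)),
      (PySem.List.pyRange (i + 1) (chord1.length : Int)).foldl (fun acc2 j =>
        if PySem.Int.mod (PySem.List.pyGetD chord1 j 0 - PySem.List.pyGetD chord1 i 0) 12 = 7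
        then acc2 ++ [(i, j)] else acc2) acc
      = acc ++ ((PySem.List.pyRange (i + 1) (chord1.length : Int)).filter (fun j =>
          decide (PySem.Int.mod (PySem.List.pyGetD chord1 j 0 - PySem.List.pyGetD chord1 i 0) 12 = 7))).map
          (fun j => (i, j)) := by
    intro i acc
    simpa using PySem.List.foldl_append_if (fun j =>
      decide (PySem.Int.mod (PySem.List.pyGetD chord1 j 0 - PySem.List.pyGetD chord1 i 0) 12 = 7))
      (fun j => (i, j)) (PySem.List.pyRange (i + 1) (chord1.length : Int)) acc
  simp only [h1]
  simpa using PySem.List.foldl_append_eq_flatMap (fun i =>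
    ((PySem.List.pyRange (i + 1) (chord1.length : Int)).filter (fun j =>
      decide (PySem.Int.mod (PySem.List.pyGetD chord1 j 0 - PySem.List.pyGetD chord1 i 0) 12 = 7))).map
      (fun j => (i, j))) (PySem.List.pyRange 0 (chord1.length : Int)) []

-- the number of times A's loop fires at target index t
lemma pvCountA (chord1 chord2 : List Int) (t : Nat) (ht : t < chord2.length) :
    ((PySem.List.pyRange 0 (chord1.length : Int)).flatMap (fun i =>
      ((PySem.List.pyRange (i + 1) (chord1.length : Int)).filter (fun j =>
        decide (PySem.Int.mod (PySem.List.pyGetD chord1 j 0 - PySem.List.pyGetD chord1 i 0) 12 = 7))).map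
        (fun j => (i, j)))).countP (pvQ chord2 t) =
    if t < chord1.length then pvK chord1 chord2 t else 0 := by
  have ht' : (t : Int) < (chord2.length : Int) := by exact_mod_cast ht
  rw [pvCountP_flatMap]
  have hblock : ∀ i : Int,
      (((PySem.List.pyRange (i + 1) (chord1.length : Int)).filter (fun j =>
        decide (PySem.Int.mod (PySem.List.pyGetD chord1 j 0 - PySem.List.pyGetD chord1 i 0) 12 = 7))).map
        (fun j => (i, j))).countP (pvQ chord2 t)
      = if ((t : Int) ∈ PySem.List.pyRange (i + 1) (chord1.length : Int) ∧
            (pvQ chord2 t (i, (t : Int)) &&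
             decide (PySem.Int.mod (PySem.List.pyGetD chord1 (t : Int) 0 - PySem.List.pyGetD chord1 i 0) 12 = 7)) = true)
        then 1 else 0 := by
    intro i
    rw [List.countP_map, List.countP_filter]
    exact pvCountP_forces _ _ ((t : Int)) (PySem.List.nodup_pyRange_one _ _)
      (fun j hj => by
        have h1 := (Bool.and_eq_true _ _).mp hj
        have h2 : ((i, j) : Int × Int).2 = (t : Int) := by
          have := of_decide_eq_true h1.1
          exact this.1
        exact h2)
  simp only [hblock]
  by_cases htn : t < chord1.length
  · have htn' : (t : Int) < (chord1.length : Int) := by exact_mod_cast htn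
    rw [if_pos htn]
    have hcong : ∀ i ∈ PySem.List.pyRange 0 (chord1.length : Int),
        (if ((t : Int) ∈ PySem.List.pyRange (i + 1) (chord1.length : Int) ∧
            (pvQ chord2 t (i, (t : Int)) &&
             decide (PySem.Int.mod (PySem.List.pyGetD chord1 (t : Int) 0 - PySem.List.pyGetD chord1 i 0) 12 = 7)) = true)
          then 1 else 0)
        = (if (i < (t : Int) ∧ pvCond chord1 chord2 (t : Int) i = true) then (1:Nat) else 0) := by
      intro i hi
      rw [PySem.List.mem_pyRange_one] at hi
      have hiff : ((t : Int) ∈ PySem.List.pyRange (i + 1) (chord1.length : Int) ∧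
            (pvQ chord2 t (i, (t : Int)) &&
             decide (PySem.Int.mod (PySem.List.pyGetD chord1 (t : Int) 0 - PySem.List.pyGetD chord1 i 0) 12 = 7)) = true)
          ↔ (i < (t : Int) ∧ pvCond chord1 chord2 (t : Int) i = true) := by
        simp only [PySem.List.mem_pyRange_one, Bool.and_eq_true, pvQ, pvCond, decide_eq_true_eq]
        constructor
        · rintro ⟨⟨h1, _⟩, ⟨_, _, _, hmod2⟩, hmod1⟩
          exact ⟨by omega, hmod1, hmod2⟩
        · rintro ⟨hlt, hmod1, hmod2⟩
          refine ⟨⟨by omega, htn'⟩, ?_, hmod1⟩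
          exact ⟨trivial, by omega, ht', hmod2⟩
      rw [if_congr hiff rfl rfl]
    rw [List.map_congr_left hcong, pvSum_ite_countP]
    rw [PySem.List.pyRange_one_append 0 (t : Int) (chord1.length : Int) (by omega) (by omega),
        List.countP_append]
    have hzero : (PySem.List.pyRange (t : Int) (chord1.length : Int)).countP
        (fun i => decide (i < (t : Int) ∧ pvCond chord1 chord2 (t : Int) i = true)) = 0 := by
      rw [List.countP_eq_zero]
      intro i hi
      rw [PySem.List.mem_pyRange_one] at hi
      simp only [decide_eq_true_eq, not_and]
      intro hlt
      omega
    rw [hzero, Nat.add_zero, pvK]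
    apply List.countP_congr
    intro i hi
    rw [PySem.List.mem_pyRange_one] at hi
    by_cases hc : pvCond chord1 chord2 (t : Int) i = true <;> simp [hc, hi.2]
  · rw [if_neg htn]
    have htn' : (chord1.length : Int) ≤ (t : Int) := by exact_mod_cast Nat.le_of_not_lt htn
    apply List.sum_eq_zero
    intro x hx
    obtain ⟨i, _, rfl⟩ := List.mem_map.mp hx
    rw [if_neg]
    rintro ⟨hmem, _⟩
    rw [PySem.List.mem_pyRange_one] at hmem
    omega

-- A's result, index by index
lemma pvA_getD (chord1 chord2 : List Int) (h : ¬(chord1.length < 2 ∨ chord2.length < 2))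
    (t : Nat) (ht : t < chord2.length) :
    (avoid_parallel_fifths chord1 chord2).getD t 0 =
      if t < chord1.length ∧ pvK chord1 chord2 t ≠ 0 then
        PySem.Int.mod (chord2.getD t 0 + pvK chord1 chord2 t) 12
      else chord2.getD t 0 := by
  unfold avoid_parallel_fifths
  rw [if_neg h, pvFifths_eq]
  have hmem : ∀ p ∈ (PySem.List.pyRange 0 (chord1.length : Int)).flatMap (fun i =>
      ((PySem.List.pyRange (i + 1) (chord1.length : Int)).filter (fun j =>
        decide (PySem.Int.mod (PySem.List.pyGetD chord1 j 0 - PySem.List.pyGetD chord1 i 0) 12 = 7))).map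
        (fun j => (i, j))), 0 ≤ p.2 := by
    intro p hp
    obtain ⟨i, hi, hp2⟩ := List.mem_flatMap.mp hp
    obtain ⟨j, hj, rfl⟩ := List.mem_map.mp hp2
    have hj' := (List.mem_filter.mp hj).1
    rw [PySem.List.mem_pyRange_one] at hj' hi
    simp only []
    omega
  rw [pvFoldA_getD chord2 _ chord2 rfl hmem t ht, pvCountA chord1 chord2 t ht]
  by_cases h1 : t < chord1.length
  · rw [if_pos h1]
    by_cases hk : pvK chord1 chord2 (t : Int) = 0
    · rw [if_neg (fun hc => hc.2 hk), hk, Function.iterate_zero_apply]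
    · obtain ⟨k, hk'⟩ := Nat.exists_eq_succ_of_ne_zero hk
      rw [hk', pvBump_iter, if_pos ⟨h1, Nat.succ_ne_zero k⟩]
      norm_num [Nat.succ_eq_add_one]
  · rw [if_neg h1, if_neg (fun hc => h1 hc.1), Function.iterate_zero_apply]

lemma pvA_length (chord1 chord2 : List Int) :
    (avoid_parallel_fifths chord1 chord2).length = chord2.length := by
  unfold avoid_parallel_fifths
  split_ifs with h
  · rfl
  · exact pvFoldA_length chord2 _ chord2

-- the key B counts at index i equals the query B looks up at index t iff pvCond holds
lemma pvKey_eq_query (chord1 chord2 : List Int) (t i : Int) :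
    (((PySem.Int.mod (PySem.List.pyGetD chord1 i 0) 12, PySem.Int.mod (PySem.List.pyGetD chord2 i 0) 12) : Int × Int) =
      (PySem.Int.mod (PySem.List.pyGetD chord1 t 0 - 7) 12, PySem.Int.mod (PySem.List.pyGetD chord2 t 0 - 7) 12)) ↔
    pvCond chord1 chord2 t i = true := by
  simp only [pvCond, decide_eq_true_eq, Prod.mk.injEq,
    PySem.Int.mod_eq_emod_of_pos (by norm_num : (0:Int) < 12)]
  omega

-- looking up B's query key in the counter of the first j keys yields pvK
lemma pvCount_lookup (chord1 chord2 : List Int) (j : Nat) :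
    (PySem.Dict.counter ((PySem.List.pyRange 0 (j : Int)).map (fun i =>
      (PySem.Int.mod (PySem.List.pyGetD chord1 i 0) 12, PySem.Int.mod (PySem.List.pyGetD chord2 i 0) 12)))).getD
      (PySem.Int.mod (PySem.List.pyGetD chord1 (j : Int) 0 - 7) 12,
       PySem.Int.mod (PySem.List.pyGetD chord2 (j : Int) 0 - 7) 12) 0
    = ((pvK chord1 chord2 (j : Int) : Int)) := by
  rw [PySem.Dict.getD_counter]
  congr 1
  rw [List.count_eq_countP, List.countP_map, pvK]
  apply List.countP_congr
  intro i _
  simp only [Function.comp, beq_iff_eq]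
  exact pvKey_eq_query chord1 chord2 (j : Int) i

-- B's loop invariant after processing indices 0 .. j-1
lemma pvFoldB_inv (chord1 chord2 : List Int) (j : Nat) (hj : (j : Int) ≤ min (chord1.length : Int) (chord2.length : Int)) :
    (((PySem.List.pyRange 0 (j : Int)).foldl (pvStepB chord1 chord2) (chord2, PySem.Dict.empty)).2 =
      PySem.Dict.counter ((PySem.List.pyRange 0 (j : Int)).map (fun i =>
        (PySem.Int.mod (PySem.List.pyGetD chord1 i 0) 12, PySem.Int.mod (PySem.List.pyGetD chord2 i 0) 12)))) ∧
    (((PySem.List.pyRange 0 (j : Int)).foldl (pvStepB chord1 chord2) (chord2, PySem.Dict.empty)).1.length = chord2.length) ∧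
    (∀ t : Nat, t < chord2.length →
      ((PySem.List.pyRange 0 (j : Int)).foldl (pvStepB chord1 chord2) (chord2, PySem.Dict.empty)).1.getD t 0 =
        if t < j ∧ pvK chord1 chord2 t ≠ 0 then
          PySem.Int.mod (chord2.getD t 0 + pvK chord1 chord2 t) 12
        else chord2.getD t 0) := by
  induction j with
  | zero =>
    have h0 : PySem.List.pyRange 0 ((0 : Nat) : Int) = [] := by simp [pysem]
    rw [h0]
    refine ⟨rfl, rfl, ?_⟩
    intro t _
    rw [if_neg (fun hc => Nat.not_lt_zero t hc.1)]
    rfl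
  | succ j ih =>
    have hj0 : (0 : Int) ≤ (j : Int) := Int.natCast_nonneg j
    have hj' : (j : Int) ≤ min (chord1.length : Int) (chord2.length : Int) := by
      push_cast at hj ⊢
      omega
    obtain ⟨ihd, ihl, ihg⟩ := ih hj'
    have hjlen2 : j < chord2.length := by
      have := hj
      push_cast at this
      omega
    have hsplit : PySem.List.pyRange 0 ((j + 1 : Nat) : Int) = PySem.List.pyRange 0 (j : Int) ++ [(j : Int)] := by
      push_cast
      exact PySem.List.pyRange_one_succ_right hj0
    rw [hsplit, List.foldl_append, List.foldl_cons, List.foldl_nil, List.map_append, List.map_cons, List.map_nil]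
    simp only [pvStepB]
    rw [ihd, pvCount_lookup chord1 chord2 j]
    refine ⟨?_, ?_, ?_⟩
    · rw [PySem.Dict.counter_append_singleton]
      rfl
    · by_cases hkz : pvK chord1 chord2 (j : Int) = 0
      · rw [hkz, if_neg (by simp)]
        exact ihl
      · rw [if_pos (by exact_mod_cast Int.natCast_ne_zero.mpr hkz), PySem.List.length_pySetD]
        exact ihl
    · intro t ht
      by_cases hkz : pvK chord1 chord2 (j : Int) = 0
      · rw [hkz, if_neg (by simp)]
        rw [ihg t ht]
        split_ifs with h1 h2 h2
        · rfl
        · exact absurd ⟨by omega, h1.2⟩ h2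
        · exfalso
          rcases Nat.lt_succ_iff_lt_or_eq.mp h2.1 with hlt | heq
          · exact h1 ⟨hlt, h2.2⟩
          · exact h2.2 (by rw [heq]; exact hkz)
        · rfl
      · rw [if_pos (by exact_mod_cast Int.natCast_ne_zero.mpr hkz),
            PySem.List.pySetD_of_nonneg _ _ hj0, Int.toNat_natCast]
        by_cases htj : t = j
        · subst htj
          have htl : t < ((PySem.List.pyRange 0 (t : Int)).foldl (pvStepB chord1 chord2) (chord2, PySem.Dict.empty)).1.length := by
            rw [ihl]; exact hjlen2
          rw [if_pos ⟨Nat.lt_succ_self t, hkz⟩]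
          simp [List.getD, htl, PySem.List.pyGetD_natCast]
        · rw [List.getD, List.getElem?_set_ne (fun he => htj he.symm), ← List.getD, ihg t ht]
          split_ifs with h1 h2 h2
          · rfl
          · exact absurd ⟨by omega, h1.2⟩ h2
          · exfalso
            rcases Nat.lt_succ_iff_lt_or_eq.mp h2.1 with hlt | heq
            · exact h1 ⟨hlt, h2.2⟩
            · exact htj heq
          · rfl

lemma pvB_getD (chord1 chord2 : List Int) (h : ¬(chord1.length < 2 ∨ chord2.length < 2))
    (t : Nat) (ht : t < chord2.length) :
    (avoid_parallel_fifths_alt chord1 chord2).getD t 0 =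
      if t < chord1.length ∧ pvK chord1 chord2 t ≠ 0 then
        PySem.Int.mod (chord2.getD t 0 + pvK chord1 chord2 t) 12
      else chord2.getD t 0 := by
  unfold avoid_parallel_fifths_alt
  rw [if_neg h]
  have hnn : (0 : Int) ≤ min (chord1.length : Int) (chord2.length : Int) := by positivity
  have hcast : (((min (chord1.length : Int) (chord2.length : Int)).toNat : Int))
      = min (chord1.length : Int) (chord2.length : Int) := Int.toNat_of_nonneg hnn
  obtain ⟨_, _, hg⟩ := pvFoldB_inv chord1 chord2 (min (chord1.length : Int) (chord2.length : Int)).toNat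
    (le_of_eq hcast)
  rw [← hcast, hg t ht]
  have hmt : (min (chord1.length : Int) (chord2.length : Int)).toNat = min chord1.length chord2.length := by
    omega
  split_ifs with h1 h2 h2
  · rfl
  · exact absurd ⟨by omega, h1.2⟩ h2
  · exact absurd ⟨by omega, h2.2⟩ h1
  · rfl

lemma pvB_length (chord1 chord2 : List Int) :
    (avoid_parallel_fifths_alt chord1 chord2).length = chord2.length := by
  unfold avoid_parallel_fifths_alt
  split_ifs with h
  · rfl
  · have hnn : (0 : Int) ≤ min (chord1.length : Int) (chord2.length : Int) := by positivity
    have hcast : (((min (chord1.length : Int) (chord2.length : Int)).toNat : Int))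
        = min (chord1.length : Int) (chord2.length : Int) := Int.toNat_of_nonneg hnn
    obtain ⟨_, hl, _⟩ := pvFoldB_inv chord1 chord2 (min (chord1.length : Int) (chord2.length : Int)).toNat
      (le_of_eq hcast)
    rw [← hcast]
    exact hl

-- ===== VERDICT (by name: the statement is the Claim_ definition above) =====
theorem avoid_parallel_fifths_spec : Claim_equal_avoid_parallel_fifths := by
  intro chord1 chord2 _
  unfold Spec_avoid_parallel_fifths
  by_cases h : chord1.length < 2 ∨ chord2.length < 2
  · unfold avoid_parallel_fifths avoid_parallel_fifths_alt
    rw [if_pos h, if_pos h]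
  · apply List.ext_getElem
    · rw [pvA_length, pvB_length]
    · intro t h1 h2
      have ht : t < chord2.length := by rw [pvA_length] at h1; exact h1
      have hA := pvA_getD chord1 chord2 h t ht
      have hB := pvB_getD chord1 chord2 h t ht
      have eA : (avoid_parallel_fifths chord1 chord2).getD t 0 = (avoid_parallel_fifths chord1 chord2)[t] :=
        List.getD_eq_getElem _ _ h1
      have eB : (avoid_parallel_fifths_alt chord1 chord2).getD t 0 = (avoid_parallel_fifths_alt chord1 chord2)[t] :=
        List.getD_eq_getElem _ _ h2
      rw [← eA, ← eB, hA, hB]
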